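-- pv_equiv track=rewrite | github.com/aeabom741/Automate_the_boring_stuff_with_python | ch07_不使用正規法尋找文字模式.py | foundnumber
-- ===== SOURCE A (Python) =====
-- def foundnumber(number):
--     if len(number) != 12:
--         return False
--     for i in range(0,4):
--         if not number[i].isdecimal():
--             return False
--     if number[4] != '-':
--         return False
--     for i in range(5,8):
--         if not number[i].isdecimal():
--             return False
--     if number[8] != '-':
--         return False
--     for i in range(9,12):
--         if not number[i].isdecimal():
--             return False
--     return True
-- ===== SOURCE B (Python) =====
-- def foundnumber(number):
--     if len(number) != 12:
--         return False
--     parts = number.split('-')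
--     if len(parts) != 3:
--         return False
--     first, mid, last = parts
--     return (len(first) == 4 and len(mid) == 3 and len(last) == 3
--             and first.isdecimal() and mid.isdecimal() and last.isdecimal())
-- ===== Notes on version B (the rewrite author's own statement) =====
-- stated objective: simpler
-- what changed: Replaced the positional index-range scans with explicit dash checks by a single split on the dash separator followed by a structural check of the three components' lengths and all-decimal contents.
import Mathlib
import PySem

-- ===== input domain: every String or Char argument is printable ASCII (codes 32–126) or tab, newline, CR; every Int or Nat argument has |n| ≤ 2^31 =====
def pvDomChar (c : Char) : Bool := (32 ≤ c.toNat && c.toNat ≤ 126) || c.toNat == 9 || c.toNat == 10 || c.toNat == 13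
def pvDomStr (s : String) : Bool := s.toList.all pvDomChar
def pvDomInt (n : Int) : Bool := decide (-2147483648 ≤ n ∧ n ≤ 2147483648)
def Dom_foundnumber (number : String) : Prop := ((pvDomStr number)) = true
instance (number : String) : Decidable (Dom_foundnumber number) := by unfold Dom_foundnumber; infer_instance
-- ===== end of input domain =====

-- B validates the same fixed ####-###-### pattern by splitting on the dash separator and checking the three
-- parts structurally, instead of A's positional index scans; objective: simpler.

-- ===== PORT A =====
-- `number[i].isdecimal()` is ported as `PySem.Chars.isdigit` on the character: on the
-- printable-ASCII domain Dom_foundnumber, str.isdecimal and the digit test '0'..'9' coincide.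
def pvDigitAt (s : String) (i : Int) : Bool :=
  match PySem.Str.pyGet? s i with
  | some c => PySem.Chars.isdigit c
  | none => false

def foundnumber (number : String) : Bool :=
  if PySem.Str.len number ≠ 12 then false
  else if ¬ ((PySem.List.pyRange 0 4 1).all fun i => pvDigitAt number i) then false
  else if PySem.Str.pyGet? number 4 ≠ some '-' then false
  else if ¬ ((PySem.List.pyRange 5 8 1).all fun i => pvDigitAt number i) then false
  else if PySem.Str.pyGet? number 8 ≠ some '-' then false
  else if ¬ ((PySem.List.pyRange 9 12 1).all fun i => pvDigitAt number i) then false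
  else true

-- ===== PORT B =====
-- part.isdecimal() is PySem.Str.strIsdigit (exact on the ASCII domain; false on "").
def foundnumber_alt (number : String) : Bool :=
  if PySem.Str.len number ≠ 12 then false
  else
    match PySem.Str.split? number "-" with
    | some [first, mid, last] =>
        decide (PySem.Str.len first = 4) && decide (PySem.Str.len mid = 3) &&
        decide (PySem.Str.len last = 3) &&
        PySem.Str.strIsdigit first && PySem.Str.strIsdigit mid && PySem.Str.strIsdigit last
    | _ => false

-- ===== PRECONDITION & SPEC =====
def Spec_foundnumber (number : String) (out : Bool) : Prop := out = foundnumber_alt number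
instance (number : String) (out : Bool) : Decidable (Spec_foundnumber number out) := by unfold Spec_foundnumber; infer_instance

-- ===== CLAIM (what is proved, stated in full; the proofs are below) =====
def Claim_equal_foundnumber : Prop := ∀ (number : String), Dom_foundnumber number → Spec_foundnumber number (foundnumber number)

-- ===== LEMMAS AND PROOFS =====

-- Simple structural description of splitting on '-': `pvDashSplit cur l` is the list of
-- '-'-separated pieces of l, with cur the (reversed) piece accumulated so far.
def pvDashSplit (cur : List Char) : List Char → List (List Char)
  | [] => [cur.reverse]
  | c :: rest => if c = '-' then cur.reverse :: pvDashSplit [] rest else pvDashSplit (c :: cur) rest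

theorem pvDashSplit_cons (cur : List Char) (c : Char) (rest : List Char) :
    pvDashSplit cur (c :: rest) =
      if c = '-' then cur.reverse :: pvDashSplit [] rest else pvDashSplit (c :: cur) rest := rfl

theorem pvDashSplit_nil (cur : List Char) : pvDashSplit cur [] = [cur.reverse] := rfl

theorem pvGo_eq (l : List Char) : ∀ (fuel : Nat) (cur : List Char) (acc : List (List Char)),
    l.length < fuel →
    PySem.Chars.splitOn.go ['-'] fuel l cur acc = acc.reverse ++ pvDashSplit cur l := by
  induction l with
  | nil =>
      intro fuel cur acc h
      cases fuel with
      | zero => omega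
      | succ f => simp [PySem.Chars.splitOn.go, pvDashSplit]
  | cons c rest ih =>
      intro fuel cur acc h
      cases fuel with
      | zero => simp at h
      | succ f =>
        have hf : rest.length < f := by simp at h; omega
        simp only [PySem.Chars.splitOn.go, List.isPrefixOf, pvDashSplit]
        split_ifs with hp hc hc
        · simp [ih f [] (cur.reverse :: acc) hf]
        · simp at hp
          exact absurd hp.symm hc
        · simp at hp
          exact absurd hc.symm hp
        · simp [ih f (c :: cur) acc hf]

theorem pvDashSplit_ne_nil : ∀ (cs cur : List Char), pvDashSplit cur cs ≠ [] := by
  intro cs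
  induction cs with
  | nil => intro cur; simp [pvDashSplit_nil]
  | cons c rest ih =>
      intro cur
      rw [pvDashSplit_cons]
      split_ifs
      · simp
      · exact ih (c :: cur)

theorem pvSplitOn_eq (cs : List Char) :
    PySem.Chars.splitOn cs ['-'] = pvDashSplit [] cs := by
  have := pvGo_eq cs (cs.length + 1) [] [] (by omega)
  simpa [PySem.Chars.splitOn] using this

-- If the split ends in exactly one / two / three pieces, the input is their '-'-interleaving.
theorem pvDashSplit_one : ∀ (cs cur p : List Char),
    pvDashSplit cur cs = [p] → cur.reverse ++ cs = p := by
  intro cs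
  induction cs with
  | nil => intro cur p h; rw [pvDashSplit_nil] at h; simp_all
  | cons c rest ih =>
      intro cur p h
      rw [pvDashSplit_cons] at h
      split_ifs at h with hc
      · simp only [List.cons.injEq] at h
        exact absurd h.2 (pvDashSplit_ne_nil rest [])
      · have := ih (c :: cur) p h
        simpa using this

theorem pvDashSplit_two : ∀ (cs cur p q : List Char),
    pvDashSplit cur cs = [p, q] → cur.reverse ++ cs = p ++ '-' :: q := by
  intro cs
  induction cs with
  | nil => intro cur p q h; rw [pvDashSplit_nil] at h; simp at h
  | cons c rest ih =>
      intro cur p q h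
      rw [pvDashSplit_cons] at h
      split_ifs at h with hc
      · obtain ⟨h1, h2⟩ := List.cons.injEq .. ▸ h
        subst hc h1
        have := pvDashSplit_one rest [] q h2
        simpa using this.symm ▸ rfl
      · have := ih (c :: cur) p q h
        simpa using this

theorem pvDashSplit_three : ∀ (cs cur p q r : List Char),
    pvDashSplit cur cs = [p, q, r] → cur.reverse ++ cs = p ++ '-' :: q ++ '-' :: r := by
  intro cs
  induction cs with
  | nil => intro cur p q r h; rw [pvDashSplit_nil] at h; simp at h
  | cons c rest ih =>
      intro cur p q r h
      rw [pvDashSplit_cons] at h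
      split_ifs at h with hc
      · obtain ⟨h1, h2⟩ := List.cons.injEq .. ▸ h
        subst hc h1
        have := pvDashSplit_two rest [] q r h2
        simp at this
        simp [this]
      · have := ih (c :: cur) p q r h
        simpa using this

theorem pvIsdigit_ne_dash {c : Char} (h : PySem.Chars.isdigit c = true) : ¬ c = '-' := by
  intro he; subst he; simp [PySem.Chars.isdigit] at h

theorem pvLen12 (cs : List Char) (h : cs.length = 12) :
    ∃ c0 c1 c2 c3 c4 c5 c6 c7 c8 c9 c10 c11 : Char, cs = [c0, c1, c2, c3, c4, c5, c6, c7, c8, c9, c10, c11] := by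
  rcases cs with _ | ⟨c0, cs⟩; · simp at h
  rcases cs with _ | ⟨c1, cs⟩; · simp at h
  rcases cs with _ | ⟨c2, cs⟩; · simp at h
  rcases cs with _ | ⟨c3, cs⟩; · simp at h
  rcases cs with _ | ⟨c4, cs⟩; · simp at h
  rcases cs with _ | ⟨c5, cs⟩; · simp at h
  rcases cs with _ | ⟨c6, cs⟩; · simp at h
  rcases cs with _ | ⟨c7, cs⟩; · simp at h
  rcases cs with _ | ⟨c8, cs⟩; · simp at h
  rcases cs with _ | ⟨c9, cs⟩; · simp at h
  rcases cs with _ | ⟨c10, cs⟩; · simp at h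
  rcases cs with _ | ⟨c11, cs⟩; · simp at h
  rcases cs with _ | ⟨x, cs⟩
  · exact ⟨c0, c1, c2, c3, c4, c5, c6, c7, c8, c9, c10, c11, rfl⟩
  · simp at h

theorem pvLen4 (cs : List Char) (h : cs.length = 4) :
    ∃ c0 c1 c2 c3 : Char, cs = [c0, c1, c2, c3] := by
  rcases cs with _ | ⟨c0, cs⟩; · simp at h
  rcases cs with _ | ⟨c1, cs⟩; · simp at h
  rcases cs with _ | ⟨c2, cs⟩; · simp at h
  rcases cs with _ | ⟨c3, cs⟩; · simp at h
  rcases cs with _ | ⟨x, cs⟩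
  · exact ⟨c0, c1, c2, c3, rfl⟩
  · simp at h

theorem pvLen3 (cs : List Char) (h : cs.length = 3) :
    ∃ c0 c1 c2 : Char, cs = [c0, c1, c2] := by
  rcases cs with _ | ⟨c0, cs⟩; · simp at h
  rcases cs with _ | ⟨c1, cs⟩; · simp at h
  rcases cs with _ | ⟨c2, cs⟩; · simp at h
  rcases cs with _ | ⟨x, cs⟩
  · exact ⟨c0, c1, c2, rfl⟩
  · simp at h

-- ===== VERDICT (by name: the statement is the Claim_ definition above) =====
set_option maxHeartbeats 1000000 in
theorem foundnumber_spec : Claim_equal_foundnumber := by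
  intro number _hdom
  unfold Spec_foundnumber
  by_cases h12 : number.toList.length = 12
  · obtain ⟨c0, c1, c2, c3, c4, c5, c6, c7, c8, c9, c10, c11, hcs⟩ := pvLen12 number.toList h12
    have hlen : (number.length : Int) = 12 := by exact_mod_cast h12
    have hr1 : PySem.List.pyRange 0 4 1 = [0, 1, 2, 3] := by decide
    have hr2 : PySem.List.pyRange 5 8 1 = [5, 6, 7] := by decide
    have hr3 : PySem.List.pyRange 9 12 1 = [9, 10, 11] := by decide
    have g0 : PySem.List.pyGet? [c0, c1, c2, c3, c4, c5, c6, c7, c8, c9, c10, c11] (0 : Int) = some c0 := rfl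
    have g1 : PySem.List.pyGet? [c0, c1, c2, c3, c4, c5, c6, c7, c8, c9, c10, c11] (1 : Int) = some c1 := rfl
    have g2 : PySem.List.pyGet? [c0, c1, c2, c3, c4, c5, c6, c7, c8, c9, c10, c11] (2 : Int) = some c2 := rfl
    have g3 : PySem.List.pyGet? [c0, c1, c2, c3, c4, c5, c6, c7, c8, c9, c10, c11] (3 : Int) = some c3 := rfl
    have g4 : PySem.List.pyGet? [c0, c1, c2, c3, c4, c5, c6, c7, c8, c9, c10, c11] (4 : Int) = some c4 := rfl
    have g5 : PySem.List.pyGet? [c0, c1, c2, c3, c4, c5, c6, c7, c8, c9, c10, c11] (5 : Int) = some c5 := rfl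
    have g6 : PySem.List.pyGet? [c0, c1, c2, c3, c4, c5, c6, c7, c8, c9, c10, c11] (6 : Int) = some c6 := rfl
    have g7 : PySem.List.pyGet? [c0, c1, c2, c3, c4, c5, c6, c7, c8, c9, c10, c11] (7 : Int) = some c7 := rfl
    have g8 : PySem.List.pyGet? [c0, c1, c2, c3, c4, c5, c6, c7, c8, c9, c10, c11] (8 : Int) = some c8 := rfl
    have g9 : PySem.List.pyGet? [c0, c1, c2, c3, c4, c5, c6, c7, c8, c9, c10, c11] (9 : Int) = some c9 := rfl
    have g10 : PySem.List.pyGet? [c0, c1, c2, c3, c4, c5, c6, c7, c8, c9, c10, c11] (10 : Int) = some c10 := rfl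
    have g11 : PySem.List.pyGet? [c0, c1, c2, c3, c4, c5, c6, c7, c8, c9, c10, c11] (11 : Int) = some c11 := rfl
    have hne : ¬ ("-" : String) = "" := by decide
    simp only [foundnumber, foundnumber_alt, pvDigitAt, PySem.Str.len, PySem.Str.pyGet?,
      PySem.Str.split?, PySem.Chars.split?, pvSplitOn_eq, PySem.Str.strIsdigit, hcs, hlen,
      hr1, hr2, hr3, List.all_cons, List.all_nil, hne, if_false,
      show ("-" : String).toList = ['-'] from rfl,
      PySem.Chars.pyGet?_eq_listPyGet?, g0, g1, g2, g3, g4, g5, g6, g7, g8, g9, g10, g11]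
    norm_num
    rw [Bool.eq_iff_iff]
    constructor
    · intro hA
      simp only [Bool.and_eq_true, decide_eq_true_eq] at hA
      obtain ⟨⟨h0, h1, h2, h3⟩, h4, ⟨h5, h6, h7⟩, h8, h9, h10, h11⟩ := hA
      rw [show pvDashSplit [] [c0, c1, c2, c3, c4, c5, c6, c7, c8, c9, c10, c11]
            = [[c0, c1, c2, c3], [c5, c6, c7], [c9, c10, c11]] by
        simp [pvDashSplit_cons, pvDashSplit_nil, pvIsdigit_ne_dash h0, pvIsdigit_ne_dash h1,
          pvIsdigit_ne_dash h2, pvIsdigit_ne_dash h3, h4, pvIsdigit_ne_dash h5,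
          pvIsdigit_ne_dash h6, pvIsdigit_ne_dash h7, h8, pvIsdigit_ne_dash h9,
          pvIsdigit_ne_dash h10, pvIsdigit_ne_dash h11]]
      simp [PySem.Chars.strIsdigit, h0, h1, h2, h3, h5, h6, h7, h9, h10, h11]
    · intro hB
      rcases hsp : pvDashSplit [] [c0, c1, c2, c3, c4, c5, c6, c7, c8, c9, c10, c11] with
        _ | ⟨p, _ | ⟨q, _ | ⟨r, _ | ⟨x, xs⟩⟩⟩⟩ <;> rw [hsp] at hB
      · simp at hB
      · simp at hB
      · simp at hB
      · simp only [List.map, Bool.and_eq_true, decide_eq_true_eq, String.length_ofList,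
          String.toList_ofList, PySem.Chars.strIsdigit, Bool.not_eq_eq_eq_not, Bool.not_true,
          List.all_eq_true] at hB
        obtain ⟨⟨⟨⟨⟨hp4, hq3⟩, hr3'⟩, -, hpd⟩, -, hqd⟩, -, hrd⟩ := hB
        have hp4' : p.length = 4 := by exact_mod_cast hp4
        have hq3' : q.length = 3 := by exact_mod_cast hq3
        have hr3'' : r.length = 3 := by exact_mod_cast hr3'
        obtain ⟨a0, a1, a2, a3, rfl⟩ := pvLen4 p hp4'
        obtain ⟨b0, b1, b2, rfl⟩ := pvLen3 q hq3'
        obtain ⟨d0, d1, d2, rfl⟩ := pvLen3 r hr3''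
        have hdec := pvDashSplit_three _ [] _ _ _ hsp
        simp only [List.reverse_nil, List.nil_append, List.cons_append,
          List.cons.injEq, List.append_nil] at hdec
        obtain ⟨e0, e1, e2, e3, e4, e5, e6, e7, e8, e9, e10, e11, -⟩ := hdec
        subst e0 e1 e2 e3 e4 e5 e6 e7 e8 e9 e10 e11
        simp_all
      · simp at hB
  · have h12' : (number.length : Int) ≠ 12 := by
      intro hz; exact h12 (by exact_mod_cast hz)
    simp [foundnumber, foundnumber_alt, PySem.Str.len, h12']
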